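-- pv_equiv track=rewrite | github.com/AP-MI-2021/lab-4-BogdanRulea | main.py | ListaObtinutaDinListaInitiala
-- ===== SOURCE A (Python) =====
-- def cmmdc(numar1 : int, numar2 : int):
--     while numar1 != numar2:
--         if numar1 > numar2:
--             numar1 -= numar2
--         else:
--             numar2 -= numar1
--
--     return numar1
--
-- def CelMaiMareCmmdcAlNumerelorPoz(lst : list[int]):
--     CelMaiMareDiv = -1
--
--     for i in lst:
--         if i > 0 and CelMaiMareDiv == -1:
--             CelMaiMareDiv = i
--
--         elif i>0:
--             CelMaiMareDiv = cmmdc(CelMaiMareDiv, i)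
--
--     return CelMaiMareDiv
--
-- def ListaObtinutaDinListaInitiala(lst : list[int]):
--     lista_finala = []
--     cmmdc_toata_lista = CelMaiMareCmmdcAlNumerelorPoz(lst)
--     for i in lst:
--         if i < 0:
--             numar_invers = str(i)#convertesc numarul din int in string
--             numar_invers = numar_invers[1:] #elimin '-'-ul din numar
--             numar_invers = numar_invers[::-1] #daca numarul este negativ inversez cifrele
--             numar_invers = int("-" + numar_invers) #adaug un zero in numarul inversat ca sa il fac din nou negativ
--             lista_finala.append(int(numar_invers))
--         elif i>0:
--             lista_finala.append(cmmdc_toata_lista) #daca numarul este pozitiv il inlocuiesc cu cmmdc numerelor pozitive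
--         else:
--             lista_finala.append(i)
--
--     return lista_finala
-- ===== SOURCE B (Python) =====
-- def ListaObtinutaDinListaInitiala(lst: list[int]):
--     g = -1
--     for x in lst:
--         if x > 0:
--             if g == -1:
--                 g = x
--             else:
--                 a, b = g, x
--                 while b:
--                     a, b = b, a % b
--                 g = a
--     return [-int(str(-x)[::-1]) if x < 0 else (g if x > 0 else x) for x in lst]
-- ===== Notes on version B (the rewrite author's own statement) =====
-- stated objective: faster
-- what changed: The repeated-subtraction GCD (O(max value) steps per pair) is replaced by the Euclidean algorithm with modulo, folded inline over the positives, and the output is built as a single list comprehension that reverses a negative's digits as -int(str(-x)[::-1]) instead of slicing off the sign, reversing, and re-prepending '-'.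
import Mathlib
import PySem

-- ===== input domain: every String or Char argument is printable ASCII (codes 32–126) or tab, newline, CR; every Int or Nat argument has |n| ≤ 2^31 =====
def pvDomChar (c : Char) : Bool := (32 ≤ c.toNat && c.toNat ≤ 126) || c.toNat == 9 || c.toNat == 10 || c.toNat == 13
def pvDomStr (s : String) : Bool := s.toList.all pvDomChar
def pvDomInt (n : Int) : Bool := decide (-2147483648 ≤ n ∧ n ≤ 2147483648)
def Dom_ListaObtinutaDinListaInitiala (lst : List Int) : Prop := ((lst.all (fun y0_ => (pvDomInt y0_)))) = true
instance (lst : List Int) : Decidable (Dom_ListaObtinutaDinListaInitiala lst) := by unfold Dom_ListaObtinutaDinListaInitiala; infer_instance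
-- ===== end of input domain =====

-- B replaces A's repeated-subtraction GCD with the Euclidean modulo GCD and builds the output
-- as a single comprehension (faster: asymptotically fewer GCD steps per pair of positives).

-- ===== PORT A =====
-- cmmdc: subtractive gcd loop; Python terminates whenever both arguments are positive
-- (the only way A calls it), and (a+b).toNat steps of fuel are then provably enough.
def pvCmmdcGo : Nat → Int → Int → Int
  | 0, a, _ => a
  | n + 1, a, b => if a ≠ b then (if a > b then pvCmmdcGo n (a - b) b else pvCmmdcGo n a (b - a)) else a

def pvCmmdc (numar1 numar2 : Int) : Int := pvCmmdcGo (numar1 + numar2).toNat numar1 numar2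

def pvCelMaiMareCmmdcAlNumerelorPoz (lst : List Int) : Int :=
  lst.foldl (fun g i => if i > 0 ∧ g = -1 then i else if i > 0 then pvCmmdc g i else g) (-1)

def ListaObtinutaDinListaInitiala (lst : List Int) : List Int :=
  let cmmdcToataLista := pvCelMaiMareCmmdcAlNumerelorPoz lst
  lst.foldl (fun acc i =>
    if i < 0 then
      -- str(i); [1:]; [::-1]; int("-" + …): the slice step -1 and the int() parse always
      -- succeed on these strings, so .getD only discharges the Option (never the default).
      let s := PySem.Int.toChars i
      let s1 := PySem.List.slice s (some 1) none
      let s2 := (PySem.List.slice? s1 none none (-1)).getD []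
      acc ++ [(PySem.Int.ofChars? ('-' :: s2)).getD 0]
    else if i > 0 then acc ++ [cmmdcToataLista]
    else acc ++ [i]) []

-- ===== PORT B =====
-- while b: a, b = b, a % b  — Euclid with modulo; fuel b.toNat+1 covers every call B makes
-- (b strictly decreases while positive).
def pvEuclidGo : Nat → Int → Int → Int
  | 0, a, _ => a
  | n + 1, a, b => if b ≠ 0 then pvEuclidGo n b (PySem.Int.mod a b) else a

def pvEuclid (a b : Int) : Int := pvEuclidGo (b.toNat + 1) a b

def ListaObtinutaDinListaInitiala_alt (lst : List Int) : List Int :=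
  let g := lst.foldl (fun g x => if x > 0 then (if g = -1 then x else pvEuclid g x) else g) (-1)
  lst.map (fun x =>
    if x < 0 then
      -- -int(str(-x)[::-1])
      -((PySem.Int.ofChars? ((PySem.List.slice? (PySem.Int.toChars (-x)) none none (-1)).getD [])).getD 0)
    else if x > 0 then g else x)

-- ===== PRECONDITION & SPEC =====
def Spec_ListaObtinutaDinListaInitiala (lst : List Int) (out : List Int) : Prop := out = ListaObtinutaDinListaInitiala_alt lst
instance (lst : List Int) (out : List Int) : Decidable (Spec_ListaObtinutaDinListaInitiala lst out) := by unfold Spec_ListaObtinutaDinListaInitiala; infer_instance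

-- ===== CLAIM (what is proved, stated in full; the proofs are below) =====
def Claim_equal_ListaObtinutaDinListaInitiala : Prop := ∀ (lst : List Int), Dom_ListaObtinutaDinListaInitiala lst → Spec_ListaObtinutaDinListaInitiala lst (ListaObtinutaDinListaInitiala lst)

-- ===== LEMMAS AND PROOFS =====

-- both gcd loops compute Int.gcd on positive arguments
theorem pvCmmdcGo_eq_gcd (f : Nat) : ∀ a b : Int, 0 < a → 0 < b → (a + b).toNat ≤ f + 2 →
    pvCmmdcGo f a b = (Int.gcd a b : Int) := by
  induction f with
  | zero =>
    intro a b ha hb hf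
    have h1 : a = 1 := by omega
    have h2 : b = 1 := by omega
    subst h1; subst h2; decide
  | succ n ih =>
    intro a b ha hb hf
    by_cases hab : a = b
    · subst hab
      simp [pvCmmdcGo, Int.gcd_self, Int.natAbs_of_nonneg ha.le]
    · by_cases hgt : a > b
      · have := ih (a - b) b (by omega) hb (by omega)
        simp only [pvCmmdcGo, if_pos hab, if_pos hgt, this, Int.gcd_sub_self_left]
      · have := ih a (b - a) ha (by omega) (by omega)
        simp only [pvCmmdcGo, if_pos hab, if_neg hgt, this, Int.gcd_sub_self_right]

theorem pvEuclidGo_eq_gcd (f : Nat) : ∀ a b : Int, 0 < a → 0 ≤ b → b.toNat < f →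
    pvEuclidGo f a b = (Int.gcd a b : Int) := by
  induction f with
  | zero => intro a b _ _ hf; omega
  | succ n ih =>
    intro a b ha hb hf
    by_cases hb0 : b = 0
    · subst hb0
      simp [pvEuclidGo, Int.natAbs_of_nonneg ha.le]
    · have hbpos : 0 < b := lt_of_le_of_ne hb (Ne.symm hb0)
      have hmnn := PySem.Int.mod_nonneg a hbpos
      have hmlt := PySem.Int.mod_lt a hbpos
      have := ih b (PySem.Int.mod a b) hbpos hmnn (by omega)
      simp only [pvEuclidGo, if_pos hb0, this] at *
      rw [PySem.Int.mod_eq_emod_of_pos hbpos]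
      rw [Int.gcd_comm b (a % b), Int.gcd_emod]

theorem pvCmmdc_eq_pvEuclid (a b : Int) (ha : 0 < a) (hb : 0 < b) : pvCmmdc a b = pvEuclid a b := by
  rw [pvCmmdc, pvEuclid, pvCmmdcGo_eq_gcd _ a b ha hb (by omega),
    pvEuclidGo_eq_gcd _ a b ha hb.le (by omega)]

-- the two gcd folds agree (invariant: the accumulator is -1 or positive)
theorem fold_gcd_eq (lst : List Int) : ∀ g : Int, g = -1 ∨ 0 < g →
    lst.foldl (fun g i => if i > 0 ∧ g = -1 then i else if i > 0 then pvCmmdc g i else g) g =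
    lst.foldl (fun g x => if x > 0 then (if g = -1 then x else pvEuclid g x) else g) g := by
  induction lst with
  | nil => intro g _; rfl
  | cons x t ih =>
    intro g hg
    simp only [List.foldl_cons]
    by_cases hx : x > 0
    · rcases hg with hg | hg
      · subst hg
        rw [if_pos ⟨hx, rfl⟩, if_pos hx, if_pos rfl]
        exact ih x (Or.inr hx)
      · have hne : g ≠ -1 := by omega
        rw [if_neg (by tauto), if_pos hx, if_pos hx, if_neg hne, pvCmmdc_eq_pvEuclid g x hg hx]
        apply ih
        right
        rw [pvEuclid, pvEuclidGo_eq_gcd _ g x hg hx.le (by omega)]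
        exact_mod_cast Int.gcd_pos_of_ne_zero_left x (by omega)
    · rw [if_neg (by tauto), if_neg hx, if_neg hx]
      exact ih g hg

-- characters produced by str(n) for n ≥ 0 are decimal digits, and there is at least one
theorem digitChar_isDigit (m : Nat) (h : m < 10) : m.digitChar.isDigit := by
  interval_cases m <;> decide

theorem toDigits_all_isDigit (n : Nat) : ∀ c ∈ Nat.toDigits 10 n, c.isDigit := by
  induction n using Nat.strong_induction_on with
  | _ n ih =>
    rw [Nat.toDigits_eq_if (by norm_num)]
    by_cases h : n < 10
    · simp only [if_pos h, List.mem_singleton]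
      rintro c rfl; exact digitChar_isDigit n h
    · simp only [if_neg h, List.mem_append, List.mem_singleton]
      rintro c (hc | rfl)
      · exact ih (n / 10) (by omega) c hc
      · exact digitChar_isDigit _ (by omega)

theorem toDigits_ne_nil (n : Nat) : Nat.toDigits 10 n ≠ [] := by
  rw [Nat.toDigits_eq_if (by norm_num)]
  split <;> simp

-- a digit is not int()-whitespace
theorem digit_not_space (c : Char) (h : c.isDigit) : PySem.Int.isIntSpace c = false := by
  simp only [Char.isDigit, Bool.and_eq_true, decide_eq_true_eq] at h
  obtain ⟨h1, h2⟩ := h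
  simp only [PySem.Int.isIntSpace, Bool.or_eq_false_iff, decide_eq_false_iff_not]
  refine ⟨⟨⟨⟨⟨?_, ?_⟩, ?_⟩, ?_⟩, ?_⟩, ?_⟩ <;> (rintro rfl; revert h1 h2; decide)

-- int('-' ++ ds) = -(int(ds)) for a nonempty all-digit string ds
theorem negParse (E : List Char) (hne : E ≠ []) (hd : ∀ c ∈ E, c.isDigit) :
    PySem.Int.ofChars? ('-' :: E) = (PySem.Int.ofChars? E).map (fun v => -v) := by
  have h1 : E.dropWhile PySem.Int.isIntSpace = E := by
    cases E with
    | nil => rfl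
    | cons a t => rw [List.dropWhile_cons_of_neg (by simp [digit_not_space a (hd a (by simp))])]
  have h2 : E.reverse.dropWhile PySem.Int.isIntSpace = E.reverse := by
    cases h : E.reverse with
    | nil => rfl
    | cons a t =>
      rw [List.dropWhile_cons_of_neg]
      have ha : a ∈ E := by
        have : a ∈ E.reverse := by rw [h]; simp
        simpa using this
      simp [digit_not_space a (hd a ha)]
  have h3 : (E.reverse ++ ['-']).dropWhile PySem.Int.isIntSpace = E.reverse ++ ['-'] := by
    cases h : E.reverse with
    | nil => simp at h; exact absurd h hne
    | cons a t =>
      rw [List.cons_append, List.dropWhile_cons_of_neg]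
      have ha : a ∈ E := by
        have : a ∈ E.reverse := by rw [h]; simp
        simpa using this
      simp [digit_not_space a (hd a ha)]
  simp only [PySem.Int.ofChars?]
  rw [List.dropWhile_cons_of_neg (by simp [PySem.Int.isIntSpace]), h1]
  simp only [List.reverse_cons, h3, h2, List.reverse_append, List.reverse_reverse,
    List.reverse_cons]
  cases E with
  | nil => exact absurd rfl hne
  | cons a t =>
    have hda := hd a (by simp)
    have hne' : a ≠ '-' := by rintro rfl; revert hda; decide
    have hne'' : a ≠ '+' := by rintro rfl; revert hda; decide
    split
    case h_1 =>
      rename_i cs ds heq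
      simp only [List.reverse_nil, List.nil_append, List.cons_append, List.cons.injEq,
        true_and] at heq
      subst heq
      split <;> simp_all [Option.map_bind]
    all_goals simp_all

-- the per-element values of the two programs agree (given equal gcd accumulators)
theorem elem_eq (g : Int) (i : Int) :
    (if i < 0 then
      (PySem.Int.ofChars? ('-' ::
        ((PySem.List.slice? (PySem.List.slice (PySem.Int.toChars i) (some 1) none) none none (-1)).getD []))).getD 0
     else if i > 0 then g else i) =
    (if i < 0 then
      -((PySem.Int.ofChars? ((PySem.List.slice? (PySem.Int.toChars (-i)) none none (-1)).getD [])).getD 0)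
     else if i > 0 then g else i) := by
  by_cases hi : i < 0
  · simp only [if_pos hi]
    have hA : PySem.Int.toChars i = '-' :: Nat.toDigits 10 i.natAbs := by
      simp [PySem.Int.toChars, hi]
    have hB : PySem.Int.toChars (-i) = Nat.toDigits 10 i.natAbs := by
      have : ¬ (-i < 0) := by omega
      have ht : (-i).toNat = i.natAbs := by omega
      simp only [PySem.Int.toChars, if_neg this, ht]
    rw [hA, hB, PySem.List.slice_from_one, List.tail_cons,
      PySem.List.slice?_none_none_neg_one, Option.getD_some,
      negParse _ (by simp [toDigits_ne_nil]) (by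
        intro c hc
        exact toDigits_all_isDigit i.natAbs c (by simpa using hc))]
    cases PySem.Int.ofChars? (Nat.toDigits 10 i.natAbs).reverse <;> simp
  · simp [hi]

-- ===== VERDICT (by name: the statement is the Claim_ definition above) =====
theorem ListaObtinutaDinListaInitiala_spec : Claim_equal_ListaObtinutaDinListaInitiala := by
  intro lst _
  show ListaObtinutaDinListaInitiala lst = ListaObtinutaDinListaInitiala_alt lst
  rw [ListaObtinutaDinListaInitiala, ListaObtinutaDinListaInitiala_alt]
  have hg : pvCelMaiMareCmmdcAlNumerelorPoz lst =
      lst.foldl (fun g x => if x > 0 then (if g = -1 then x else pvEuclid g x) else g) (-1) :=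
    fold_gcd_eq lst (-1) (Or.inl rfl)
  rw [hg]
  set g := lst.foldl (fun g x => if x > 0 then (if g = -1 then x else pvEuclid g x) else g) (-1) with hgdef
  have hbody : ∀ (acc : List Int) (i : Int),
      (if i < 0 then
        acc ++ [(PySem.Int.ofChars? ('-' ::
          ((PySem.List.slice? (PySem.List.slice (PySem.Int.toChars i) (some 1) none) none none (-1)).getD []))).getD 0]
       else if i > 0 then acc ++ [g] else acc ++ [i]) =
      acc ++ [if i < 0 then
        -((PySem.Int.ofChars? ((PySem.List.slice? (PySem.Int.toChars (-i)) none none (-1)).getD [])).getD 0)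
       else if i > 0 then g else i] := by
    intro acc i
    rw [← elem_eq g i]
    split_ifs <;> rfl
  calc lst.foldl (fun acc i =>
        if i < 0 then
          acc ++ [(PySem.Int.ofChars? ('-' ::
            ((PySem.List.slice? (PySem.List.slice (PySem.Int.toChars i) (some 1) none) none none (-1)).getD []))).getD 0]
        else if i > 0 then acc ++ [g] else acc ++ [i]) []
      = lst.foldl (fun acc i => acc ++ [if i < 0 then
          -((PySem.Int.ofChars? ((PySem.List.slice? (PySem.Int.toChars (-i)) none none (-1)).getD [])).getD 0)
         else if i > 0 then g else i]) [] := by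
        exact PySem.List.foldl_congr_mem lst _ _ [] (fun acc i _ => hbody acc i)
    _ = lst.map (fun i => if i < 0 then
          -((PySem.Int.ofChars? ((PySem.List.slice? (PySem.Int.toChars (-i)) none none (-1)).getD [])).getD 0)
         else if i > 0 then g else i) := by
        simpa using PySem.List.foldl_append_singleton_eq_map
          (fun i => if i < 0 then
            -((PySem.Int.ofChars? ((PySem.List.slice? (PySem.Int.toChars (-i)) none none (-1)).getD [])).getD 0)
           else if i > 0 then g else i) lst []
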